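-- pv_equiv track=rewrite | github.com/vaibhavr2107/store-proc | workflow_3/service_architecture.py | _infer_id_column
-- ===== SOURCE A (Python) =====
-- from typing import Any, Dict, List, Optional
--
-- def _infer_id_column(table: str, columns: List[str]) -> Optional[str]:
--     if not columns:
--         return "id"
--     candidates = [col for col in columns if col.lower() == "id"]
--     if candidates:
--         return candidates[0]
--     singular = _singularize(table)
--     preferred = f"{singular}_id"
--     for col in columns:
--         if col.lower() == preferred.lower():
--             return col
--     ending_matches = [col for col in columns if col.lower().endswith("_id")]
--     if ending_matches:
--         return ending_matches[0]
--     return columns[0]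
--
-- def _singularize(name: str) -> str:
--     if name.endswith("ies"):
--         return name[:-3] + "y"
--     if name.endswith("ses"):
--         return name[:-2]
--     if name.endswith("s") and len(name) > 1:
--         return name[:-1]
--     return name
-- ===== SOURCE B (Python) =====
-- from typing import List, Optional
--
-- def _singularize(name: str) -> str:
--     if name.endswith("ies"):
--         return name[:-3] + "y"
--     if name.endswith("ses"):
--         return name[:-2]
--     if name.endswith("s") and len(name) > 1:
--         return name[:-1]
--     return name
--
-- def _infer_id_column(table: str, columns: List[str]) -> Optional[str]:
--     if not columns:
--         return "id"
--     preferred_lower = f"{_singularize(table)}_id".lower()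
--
--     def prio(col: str) -> int:
--         low = col.lower()
--         if low == "id":
--             return 0
--         if low == preferred_lower:
--             return 1
--         if low.endswith("_id"):
--             return 2
--         return 3
--
--     best, best_p = columns[0], prio(columns[0])
--     for col in columns[1:]:
--         p = prio(col)
--         if p < best_p:
--             best, best_p = col, p
--     return best
-- ===== Notes on version B (the rewrite author's own statement) =====
-- stated objective: simpler
-- what changed: Replaces A's three separate passes (filter for 'id', loop comparing against preferred.lower() recomputed per column, filter for '*_id', plus fallback) with one priority function computed per column and a single first-minimum pass.
import Mathlib
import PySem

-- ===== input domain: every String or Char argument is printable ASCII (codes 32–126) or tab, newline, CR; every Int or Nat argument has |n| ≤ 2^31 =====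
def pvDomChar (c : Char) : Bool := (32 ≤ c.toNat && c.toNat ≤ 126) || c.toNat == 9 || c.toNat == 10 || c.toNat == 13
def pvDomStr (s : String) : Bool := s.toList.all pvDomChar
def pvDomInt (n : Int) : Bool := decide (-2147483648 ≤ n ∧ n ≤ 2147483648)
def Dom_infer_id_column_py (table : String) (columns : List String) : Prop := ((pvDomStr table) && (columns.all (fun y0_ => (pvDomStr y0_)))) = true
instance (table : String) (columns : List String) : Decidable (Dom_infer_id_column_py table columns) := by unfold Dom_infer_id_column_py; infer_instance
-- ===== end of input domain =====

-- B replaces A's three separate passes (and fallback) by a priority function and one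
-- first-minimum pass over the columns; objective: simpler. Same return value everywhere.

-- ===== PORT A =====
-- shared helper: Python _singularize (identical in Source A and Source B)
def pv_singularize (name : String) : String :=
  if PySem.Str.endswith name "ies" then PySem.Str.slice name none (some (-3)) ++ "y"
  else if PySem.Str.endswith name "ses" then PySem.Str.slice name none (some (-2))
  else if PySem.Str.endswith name "s" && decide (1 < (PySem.Str.len name)) then
    PySem.Str.slice name none (some (-1))
  else name

def infer_id_column_py (table : String) (columns : List String) : Option String :=
  if columns.isEmpty then some "id"
  else
    match columns.filter (fun col => PySem.Str.lower col == "id") with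
    | c :: _ => some c
    | [] =>
      let singular := pv_singularize table
      let preferred := singular ++ "_id"
      match columns.find? (fun col => PySem.Str.lower col == PySem.Str.lower preferred) with
      | some c => some c
      | none =>
        match columns.filter (fun col => PySem.Str.endswith (PySem.Str.lower col) "_id") with
        | c :: _ => some c
        | [] => columns[0]?

-- ===== PORT B =====
def pv_prio (preferredLower : String) (col : String) : Nat :=
  let low := PySem.Str.lower col
  if low == "id" then 0
  else if low == preferredLower then 1
  else if PySem.Str.endswith low "_id" then 2
  else 3

def infer_id_column_py_alt (table : String) (columns : List String) : Option String :=
  match columns with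
  | [] => some "id"
  | c :: rest =>
    let pl := PySem.Str.lower (pv_singularize table ++ "_id")
    let best := rest.foldl
      (fun b col =>
        let p := pv_prio pl col
        if p < b.2 then (col, p) else b)
      (c, pv_prio pl c)
    some best.1

-- ===== PRECONDITION & SPEC =====
def Spec_infer_id_column_py (table : String) (columns : List String) (out : Option String) : Prop := out = infer_id_column_py_alt table columns
instance (table : String) (columns : List String) (out : Option String) : Decidable (Spec_infer_id_column_py table columns out) := by unfold Spec_infer_id_column_py; infer_instance

-- ===== CLAIM (what is proved, stated in full; the proofs are below) =====
def Claim_equal_infer_id_column_py : Prop := ∀ (table : String) (columns : List String), Dom_infer_id_column_py table columns → Spec_infer_id_column_py table columns (infer_id_column_py table columns)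

-- ===== LEMMAS AND PROOFS =====

-- B's fold never moves off an accumulator that is already minimal
theorem pv_fold_stay {α : Type} (f : α → Nat) (l : List α) (b : α × Nat)
    (h : ∀ x ∈ l, ¬ f x < b.2) :
    l.foldl (fun b col => let p := f col; if p < b.2 then (col, p) else b) b = b := by
  induction l generalizing b with
  | nil => rfl
  | cons x xs ih =>
    simp only [List.foldl_cons]
    rw [if_neg (h x (by simp))]
    exact ih b (fun z hz => h z (by simp [hz]))

-- B's fold lands on the first element attaining the minimum, once it beats the accumulator
theorem pv_fold_firstmin {α : Type} (f : α → Nat) (l : List α) (b : α × Nat) (y : α)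
    (hlt : f y < b.2) (hmin : ∀ x ∈ l, f y ≤ f x)
    (hfind : l.find? (fun x => f x == f y) = some y) :
    l.foldl (fun b col => let p := f col; if p < b.2 then (col, p) else b) b = (y, f y) := by
  induction l generalizing b with
  | nil => simp at hfind
  | cons x xs ih =>
    by_cases hx : f x = f y
    · have hxy : x = y := by
        rw [List.find?_cons_of_pos (by simp [hx])] at hfind
        exact Option.some.inj hfind
      subst hxy
      simp only [List.foldl_cons]
      rw [if_pos hlt]
      exact pv_fold_stay f xs (x, f x) (fun z hz => by
        have := hmin z (by simp [hz]); omega)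
    · rw [List.find?_cons_of_neg (by simp [hx])] at hfind
      have hle : f y < f x := by
        have := hmin x (by simp); omega
      have hmin' : ∀ z ∈ xs, f y ≤ f z := fun z hz => hmin z (by simp [hz])
      simp only [List.foldl_cons]
      by_cases hx2 : f x < b.2
      · rw [if_pos hx2]
        exact ih (x, f x) (by omega) hmin' hfind
      · rw [if_neg hx2]
        exact ih b hlt hmin' hfind

-- combined selection lemma, with the head as the initial accumulator
theorem pv_fold_sel {α : Type} (f : α → Nat) (c : α) (rest : List α) (y : α)
    (hmin : ∀ x ∈ c :: rest, f y ≤ f x)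
    (hfind : (c :: rest).find? (fun x => f x == f y) = some y) :
    (rest.foldl (fun b col => let p := f col; if p < b.2 then (col, p) else b) (c, f c)).1 = y := by
  by_cases hc : f c = f y
  · have hcy : c = y := by
      rw [List.find?_cons_of_pos (by simp [hc])] at hfind
      exact Option.some.inj hfind
    subst hcy
    rw [pv_fold_stay f rest (c, f c) (fun z hz => by
      have := hmin z (by simp [hz]); omega)]
  · rw [List.find?_cons_of_neg (by simp [hc])] at hfind
    have hlt : f y < f c := by
      have := hmin c (by simp); omega
    rw [pv_fold_firstmin f rest (c, f c) y hlt (fun z hz => hmin z (by simp [hz])) hfind]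

theorem pv_find?_congr_mem {α : Type} (p q : α → Bool) (l : List α)
    (h : ∀ x ∈ l, p x = q x) : l.find? p = l.find? q := by
  induction l with
  | nil => rfl
  | cons x xs ih =>
    rw [List.find?_cons, List.find?_cons, h x (by simp),
      ih (fun z hz => h z (by simp [hz]))]

theorem pv_head?_filter {α : Type} (p : α → Bool) (l : List α) :
    (l.filter p).head? = l.find? p := by
  induction l with
  | nil => rfl
  | cons x xs ih =>
    rw [List.filter_cons, List.find?_cons]
    by_cases hx : p x
    · simp [hx]
    · simp [hx, ih]

-- band characterisation of pv_prio
theorem pv_prio_eq_zero (pl col : String) :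
    (pv_prio pl col = 0) ↔ (PySem.Str.lower col == "id") = true := by
  unfold pv_prio; dsimp only; split_ifs <;> simp_all

theorem pv_prio_eq_one (pl col : String) :
    (pv_prio pl col = 1) ↔ ((PySem.Str.lower col == "id") = false ∧ (PySem.Str.lower col == pl) = true) := by
  unfold pv_prio; dsimp only; split_ifs <;> simp_all

theorem pv_prio_eq_two (pl col : String) :
    (pv_prio pl col = 2) ↔ ((PySem.Str.lower col == "id") = false ∧ (PySem.Str.lower col == pl) = false ∧ PySem.Str.endswith (PySem.Str.lower col) "_id" = true) := by
  unfold pv_prio; dsimp only; split_ifs <;> simp_all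

theorem pv_prio_eq_three (pl col : String) :
    (pv_prio pl col = 3) ↔ ((PySem.Str.lower col == "id") = false ∧ (PySem.Str.lower col == pl) = false ∧ PySem.Str.endswith (PySem.Str.lower col) "_id" = false) := by
  unfold pv_prio; dsimp only; split_ifs <;> simp_all

theorem pv_prio_le_three (pl col : String) : pv_prio pl col ≤ 3 := by
  unfold pv_prio; dsimp only; split_ifs <;> omega

-- ===== VERDICT (by name: the statement is the Claim_ definition above) =====
theorem infer_id_column_py_spec : Claim_equal_infer_id_column_py := by
  intro table columns _
  unfold Spec_infer_id_column_py infer_id_column_py infer_id_column_py_alt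
  cases columns with
  | nil => rfl
  | cons c rest =>
    simp only [List.isEmpty_cons, Bool.false_eq_true, if_false]
    rcases h0 : (c :: rest).filter (fun col => PySem.Str.lower col == "id") with _ | ⟨y, ys⟩
    case cons.cons =>
      -- a column whose lower form is "id": band 0
      have hy : (c :: rest).find? (fun col => PySem.Str.lower col == "id") = some y := by
        rw [← pv_head?_filter, h0]; rfl
      have hqy : (PySem.Str.lower y == "id") = true := by
        have := List.find?_some hy; simpa using this
      have hfy : pv_prio (PySem.Str.lower (pv_singularize table ++ "_id")) y = 0 :=
        (pv_prio_eq_zero _ y).2 hqy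
      have hfind : (c :: rest).find?
          (fun x => pv_prio (PySem.Str.lower (pv_singularize table ++ "_id")) x ==
            pv_prio (PySem.Str.lower (pv_singularize table ++ "_id")) y) = some y := by
        rw [hfy, ← hy]
        refine pv_find?_congr_mem _ _ _ (fun x _ => ?_)
        by_cases hx : (PySem.Str.lower x == "id") = true
        · simp [(pv_prio_eq_zero _ x).2 hx, hx]
        · have h1 : pv_prio (PySem.Str.lower (pv_singularize table ++ "_id")) x ≠ 0 :=
            fun hc => hx ((pv_prio_eq_zero _ x).1 hc)
          simp only [Bool.not_eq_true] at hx
          simp [h1, hx]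
      rw [pv_fold_sel _ c rest y (fun x _ => by rw [hfy]; omega) hfind]
    case nil =>
      have hno0 : ∀ x ∈ c :: rest, (PySem.Str.lower x == "id") = false := by
        intro x hx
        have := List.filter_eq_nil_iff.1 h0 x hx
        simpa using this
      have hf0 : ∀ x ∈ c :: rest, pv_prio (PySem.Str.lower (pv_singularize table ++ "_id")) x ≠ 0 :=
        fun x hx hc => by simpa [hno0 x hx] using (pv_prio_eq_zero _ x).1 hc
      rcases h1 : (c :: rest).find?
          (fun col => PySem.Str.lower col == PySem.Str.lower (pv_singularize table ++ "_id")) with _ | y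
      case some =>
        have hy : y ∈ c :: rest := List.mem_of_find?_eq_some h1
        have hqy : (PySem.Str.lower y == PySem.Str.lower (pv_singularize table ++ "_id")) = true := by
          have := List.find?_some h1; simpa using this
        have hfy : pv_prio (PySem.Str.lower (pv_singularize table ++ "_id")) y = 1 :=
          (pv_prio_eq_one _ y).2 ⟨hno0 y hy, hqy⟩
        have hfind : (c :: rest).find?
            (fun x => pv_prio (PySem.Str.lower (pv_singularize table ++ "_id")) x ==
              pv_prio (PySem.Str.lower (pv_singularize table ++ "_id")) y) = some y := by
          rw [hfy, ← h1]
          refine pv_find?_congr_mem _ _ _ (fun x hx => ?_)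
          by_cases hq : (PySem.Str.lower x == PySem.Str.lower (pv_singularize table ++ "_id")) = true
          · simp [(pv_prio_eq_one _ x).2 ⟨hno0 x hx, hq⟩, hq]
          · have hne : pv_prio (PySem.Str.lower (pv_singularize table ++ "_id")) x ≠ 1 :=
              fun hc => hq ((pv_prio_eq_one _ x).1 hc).2
            simp only [Bool.not_eq_true] at hq
            simp [hne, hq]
        rw [pv_fold_sel _ c rest y (fun x hx => by
          rw [hfy]
          have h3 := pv_prio_le_three (PySem.Str.lower (pv_singularize table ++ "_id")) x
          have := hf0 x hx
          omega) hfind]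
      case none =>
        have hno1 : ∀ x ∈ c :: rest,
            (PySem.Str.lower x == PySem.Str.lower (pv_singularize table ++ "_id")) = false := by
          intro x hx
          have := List.find?_eq_none.1 h1 x hx
          simpa using this
        have hf1 : ∀ x ∈ c :: rest, pv_prio (PySem.Str.lower (pv_singularize table ++ "_id")) x ≠ 1 :=
          fun x hx hc => by simpa [hno1 x hx] using ((pv_prio_eq_one _ x).1 hc).2
        rcases h2 : (c :: rest).filter
            (fun col => PySem.Str.endswith (PySem.Str.lower col) "_id") with _ | ⟨y, ys⟩
        case cons =>
          have hy' : (c :: rest).find? (fun col => PySem.Str.endswith (PySem.Str.lower col) "_id") = some y := by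
            rw [← pv_head?_filter, h2]; rfl
          have hy : y ∈ c :: rest := List.mem_of_find?_eq_some hy'
          have hqy : PySem.Str.endswith (PySem.Str.lower y) "_id" = true := by
            have := List.find?_some hy'; simpa using this
          have hfy : pv_prio (PySem.Str.lower (pv_singularize table ++ "_id")) y = 2 :=
            (pv_prio_eq_two _ y).2 ⟨hno0 y hy, hno1 y hy, hqy⟩
          have hfind : (c :: rest).find?
              (fun x => pv_prio (PySem.Str.lower (pv_singularize table ++ "_id")) x ==
                pv_prio (PySem.Str.lower (pv_singularize table ++ "_id")) y) = some y := by
            rw [hfy, ← hy']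
            refine pv_find?_congr_mem _ _ _ (fun x hx => ?_)
            by_cases hq : PySem.Str.endswith (PySem.Str.lower x) "_id" = true
            · rw [(pv_prio_eq_two _ x).2 ⟨hno0 x hx, hno1 x hx, hq⟩, hq]
              rfl
            · have hne : pv_prio (PySem.Str.lower (pv_singularize table ++ "_id")) x ≠ 2 :=
                fun hc => hq ((pv_prio_eq_two _ x).1 hc).2.2
              simp only [Bool.not_eq_true] at hq
              rw [hq]
              simp [hne]
          rw [pv_fold_sel _ c rest y (fun x hx => by
            rw [hfy]
            have h3 := pv_prio_le_three (PySem.Str.lower (pv_singularize table ++ "_id")) x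
            have := hf0 x hx
            have := hf1 x hx
            omega) hfind]
        case nil =>
          have hno2 : ∀ x ∈ c :: rest, PySem.Str.endswith (PySem.Str.lower x) "_id" = false := by
            intro x hx
            have := List.filter_eq_nil_iff.1 h2 x hx
            simpa using this
          have hf3 : ∀ x ∈ c :: rest, pv_prio (PySem.Str.lower (pv_singularize table ++ "_id")) x = 3 :=
            fun x hx => (pv_prio_eq_three _ x).2 ⟨hno0 x hx, hno1 x hx, hno2 x hx⟩
          rw [pv_fold_stay _ rest (c, pv_prio (PySem.Str.lower (pv_singularize table ++ "_id")) c)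
            (fun x hx => by
              rw [hf3 x (by simp [hx]), hf3 c (by simp)]; omega)]
          rfl
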